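-- pv_equiv track=rewrite | github.com/shathurchan/ensae-prog26 | code/graph.py | est_pareto_domine
-- ===== SOURCE A (Python) =====
-- def est_pareto_domine(noeud, temps, fatigue, non_domines):
--     """
--     Elagage de Pareto : vérifie si un état (noeud, temps, fatigue) est dominé.
--
--     Un état (t, f) est dominé s'il existe un état déjà connu (t', f') tel que
--     t' <= t et f' <= f avec au moins une inégalité stricte.
--     Dans ce cas, l'état ne peut pas mener à une solution optimale et on l'ignore.
--
--     Met aussi à jour non_domines en supprimant les états devenus dominés.
--     Retourne True si l'état est dominé, False sinon.
--     """
--     etats_connus = non_domines.get(noeud, [])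
--
--     for t_prec, f_prec in etats_connus:
--         if t_prec <= temps and f_prec <= fatigue and (t_prec < temps or f_prec < fatigue):
--             return True  # dominé, on ignore cet état
--
--     # Supprimer les anciens états dominés par le nouvel état
--     non_domines[noeud] = [
--         (t, f) for t, f in etats_connus
--         if not (temps <= t and fatigue <= f and (temps < t or fatigue < f))
--     ]
--     non_domines[noeud].append((temps, fatigue))
--     return False
-- ===== SOURCE B (Python) =====
-- def est_pareto_domine(noeud, temps, fatigue, non_domines):
--     """One-pass aggregation: instead of testing each known state for dominance
--     with an early return, compute two minima over the known states and decide
--     dominance from them.  Mutates non_domines exactly like the original."""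
--     etats_connus = non_domines.get(noeud, [])
--
--     min_f_le = None   # min fatigue among states with t <= temps
--     min_f_lt = None   # min fatigue among states with t <  temps
--     for t, f in etats_connus:
--         if t <= temps:
--             if min_f_le is None or f < min_f_le:
--                 min_f_le = f
--             if t < temps and (min_f_lt is None or f < min_f_lt):
--                 min_f_lt = f
--
--     if (min_f_le is not None and min_f_le < fatigue) or \
--        (min_f_lt is not None and min_f_lt <= fatigue):
--         return True  # dominé
--
--     non_domines[noeud] = [
--         (t, f) for t, f in etats_connus
--         if not (temps <= t and fatigue <= f and (temps < t or fatigue < f))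
--     ]
--     non_domines[noeud].append((temps, fatigue))
--     return False
-- ===== Notes on version B (the rewrite author's own statement) =====
-- stated objective: alternative
-- what changed: Replaced the per-state dominance scan with early return by a single aggregation pass computing two fatigue minima (over states with t <= temps and t < temps), from which dominance is decided by two comparisons; same mutation of non_domines.
import Mathlib
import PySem

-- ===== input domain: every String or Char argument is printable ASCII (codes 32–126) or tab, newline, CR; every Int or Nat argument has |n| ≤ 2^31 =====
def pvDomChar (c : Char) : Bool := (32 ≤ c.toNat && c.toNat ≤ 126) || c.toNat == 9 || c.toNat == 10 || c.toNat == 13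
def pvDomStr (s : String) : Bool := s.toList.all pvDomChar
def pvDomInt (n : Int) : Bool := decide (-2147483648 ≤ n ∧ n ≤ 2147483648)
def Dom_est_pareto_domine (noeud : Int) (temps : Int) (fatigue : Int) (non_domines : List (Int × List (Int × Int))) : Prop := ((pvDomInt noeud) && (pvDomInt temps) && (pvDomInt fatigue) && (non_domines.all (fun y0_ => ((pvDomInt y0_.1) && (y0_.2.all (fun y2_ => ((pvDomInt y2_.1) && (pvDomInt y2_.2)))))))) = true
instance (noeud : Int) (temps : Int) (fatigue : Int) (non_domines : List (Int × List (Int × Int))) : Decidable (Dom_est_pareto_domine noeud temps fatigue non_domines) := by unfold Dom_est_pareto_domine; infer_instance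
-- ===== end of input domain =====

-- B replaces A's early-return dominance scan by a one-pass aggregation of two
-- fatigue minima (objective: alternative, same O(k)).  Both Pythons mutate the
-- dict non_domines identically on the False branch; the equivalence proved here
-- is about the RETURN value only (the ports return only the Bool).

-- ===== PORT A =====
-- non_domines.get(noeud, []) : first-match association-list lookup
def pvGetEtats (noeud : Int) (non_domines : List (Int × List (Int × Int))) : List (Int × Int) :=
  ((non_domines.find? (fun p => p.1 == noeud)).map (·.2)).getD []

-- 'for t_prec, f_prec in etats_connus: if … return True' ; falls through to False
def pvLoopA (temps fatigue : Int) : List (Int × Int) → Bool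
  | [] => false
  | (t, f) :: rest =>
    if t ≤ temps ∧ f ≤ fatigue ∧ (t < temps ∨ f < fatigue) then true
    else pvLoopA temps fatigue rest

def est_pareto_domine (noeud : Int) (temps : Int) (fatigue : Int) (non_domines : List (Int × List (Int × Int))) : Bool :=
  pvLoopA temps fatigue (pvGetEtats noeud non_domines)

-- ===== PORT B =====
-- one loop iteration of Source B: update (min_f_le, min_f_lt)
def pvStepB (temps : Int) (acc : Option Int × Option Int) (p : Int × Int) : Option Int × Option Int :=
  if p.1 ≤ temps then
    (match acc.1 with
      | none => some p.2
      | some m => if p.2 < m then some p.2 else some m,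
     if p.1 < temps then
       (match acc.2 with
         | none => some p.2
         | some m => if p.2 < m then some p.2 else some m)
     else acc.2)
  else acc

-- '(min_f_le is not None and min_f_le < fatigue) or (min_f_lt is not None and min_f_lt <= fatigue)'
def pvDecideB (fatigue : Int) (acc : Option Int × Option Int) : Bool :=
  (match acc.1 with | none => false | some m => m < fatigue) ||
  (match acc.2 with | none => false | some m => m ≤ fatigue)

def est_pareto_domine_alt (noeud : Int) (temps : Int) (fatigue : Int) (non_domines : List (Int × List (Int × Int))) : Bool :=
  pvDecideB fatigue ((pvGetEtats noeud non_domines).foldl (pvStepB temps) (none, none))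

-- ===== PRECONDITION & SPEC =====
def Spec_est_pareto_domine (noeud : Int) (temps : Int) (fatigue : Int) (non_domines : List (Int × List (Int × Int))) (out : Bool) : Prop := out = est_pareto_domine_alt noeud temps fatigue non_domines
instance (noeud : Int) (temps : Int) (fatigue : Int) (non_domines : List (Int × List (Int × Int))) (out : Bool) : Decidable (Spec_est_pareto_domine noeud temps fatigue non_domines out) := by unfold Spec_est_pareto_domine; infer_instance

-- ===== CLAIM (what is proved, stated in full; the proofs are below) =====
def Claim_equal_est_pareto_domine : Prop := ∀ (noeud : Int) (temps : Int) (fatigue : Int) (non_domines : List (Int × List (Int × Int))), Dom_est_pareto_domine noeud temps fatigue non_domines → Spec_est_pareto_domine noeud temps fatigue non_domines (est_pareto_domine noeud temps fatigue non_domines)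

-- ===== LEMMAS AND PROOFS =====
-- one step of B's fold preserves the decision, accumulating the per-element test
lemma pvDecideB_stepB (temps fatigue : Int) (acc : Option Int × Option Int) (p : Int × Int) :
    pvDecideB fatigue (pvStepB temps acc p)
      = (pvDecideB fatigue acc ||
         decide (p.1 ≤ temps ∧ p.2 ≤ fatigue ∧ (p.1 < temps ∨ p.2 < fatigue))) := by
  obtain ⟨mle, mlt⟩ := acc
  obtain ⟨t, f⟩ := p
  rcases mle with _ | a <;> rcases mlt with _ | b <;>
    simp only [pvStepB, pvDecideB] <;>
    split_ifs <;>
    (rw [← Bool.coe_iff_coe];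
     simp only [Bool.or_eq_true, decide_eq_true_eq, Bool.false_eq_true, false_or, or_false];
     first | omega | (simp only [false_iff]; omega))

-- B's whole fold computes A's early-return scan
lemma pvFold_eq_loop (temps fatigue : Int) (etats : List (Int × Int))
    (acc : Option Int × Option Int) :
    pvDecideB fatigue (etats.foldl (pvStepB temps) acc)
      = (pvDecideB fatigue acc || pvLoopA temps fatigue etats) := by
  induction etats generalizing acc with
  | nil => simp [pvLoopA]
  | cons p rest ih =>
    obtain ⟨t, f⟩ := p
    simp only [List.foldl_cons, ih, pvDecideB_stepB, pvLoopA]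
    by_cases h : t ≤ temps ∧ f ≤ fatigue ∧ (t < temps ∨ f < fatigue) <;>
      simp [h]

-- ===== VERDICT (by name: the statement is the Claim_ definition above) =====
theorem est_pareto_domine_spec : Claim_equal_est_pareto_domine := by
  intro noeud temps fatigue non_domines _
  unfold Spec_est_pareto_domine est_pareto_domine est_pareto_domine_alt
  rw [pvFold_eq_loop]
  simp [pvDecideB]
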